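-- pv_equiv track=rewrite | github.com/BYU-Omics/Nanotrons | calibration.py | get_well_types
-- ===== SOURCE A (Python) =====
-- SMALL_WELL = "S"
--
-- BIG_WELL = "B"
--
-- def get_well_types(grid, row_types):
--     # Calculate the amount of wells that will be considered
--     amount_of_wells = grid[0] * grid[1]
--     list_of_well_types = [ None for _ in range(amount_of_wells)]
--     well_index = 0
--
--     for row in range(grid[0]):
--         row_type = row_types[row]
--         for column in range(grid[1]):
--             if row_type == "BS":
--                 if column % 2 == 0:
--                     list_of_well_types[well_index] = BIG_WELL
--                 else:
--                     list_of_well_types[well_index] = SMALL_WELL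
--             elif row_type == "B":
--                 list_of_well_types[well_index] = BIG_WELL
--             elif row_type == "S":
--                 list_of_well_types[well_index] = SMALL_WELL
--             well_index = well_index + 1
--
--     return list_of_well_types
-- ===== SOURCE B (Python) =====
-- SMALL_WELL = "S"
--
-- BIG_WELL = "B"
--
-- def get_well_types(grid, row_types):
--     rows, cols = grid
--     # Build each of the three possible row templates ONCE, keyed by row type.
--     templates = {
--         "BS": [BIG_WELL if c % 2 == 0 else SMALL_WELL for c in range(cols)],
--         "B": [BIG_WELL] * cols,
--         "S": [SMALL_WELL] * cols,
--     }
--     blank = [None] * cols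
--     # The whole grid is the flattening of one template lookup per row.
--     return [cell
--             for row in range(rows)
--             for cell in templates.get(row_types[row], blank)]
-- ===== Notes on version B (the rewrite author's own statement) =====
-- stated objective: alternative
-- what changed: Replaces A's preallocated None buffer, running well_index and per-cell type branch by a lookup table: the three possible row templates are each built once in a dict, and the output is a flattening comprehension that maps every row's type to its precomputed template (unknown types fall back to a blank template).
-- intended difference: On grids whose two dimensions are both negative A returns a list of grid[0]*grid[1] leftover None entries from its preallocation while B returns the empty list, the intended result for a grid with no rows. — e.g. on get_well_types((-1, -2), ["B"]): A returns [none, none], B returns []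
import Mathlib
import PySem

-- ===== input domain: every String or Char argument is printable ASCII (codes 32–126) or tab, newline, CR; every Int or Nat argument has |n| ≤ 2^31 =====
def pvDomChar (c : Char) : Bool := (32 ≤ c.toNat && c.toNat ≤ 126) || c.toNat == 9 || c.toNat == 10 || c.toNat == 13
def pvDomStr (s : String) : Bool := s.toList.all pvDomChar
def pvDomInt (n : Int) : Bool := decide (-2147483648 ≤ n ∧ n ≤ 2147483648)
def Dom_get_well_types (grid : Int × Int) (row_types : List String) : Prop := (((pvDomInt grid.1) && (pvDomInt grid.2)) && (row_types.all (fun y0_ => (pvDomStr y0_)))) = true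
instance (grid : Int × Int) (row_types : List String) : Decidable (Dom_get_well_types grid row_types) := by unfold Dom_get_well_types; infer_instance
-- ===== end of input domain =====

-- B replaces the preallocated buffer / running index / per-cell branch by a lookup table of
-- three row templates built once, flattened over the rows; same asymptotic cost.
-- Equivalence is claimed outside D_ (both grid dimensions negative).

-- ===== PORT A =====
-- inner-loop body of A (the per-column branch writing into the buffer at well_index)
def pvStepA (row_type : String) (st : List (Option String) × Int) (column : Int) :
    List (Option String) × Int :=
  let lst :=
    if row_type == "BS" then
      (if PySem.Int.mod column 2 == 0 then st.1.set st.2.toNat (some "B")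
       else st.1.set st.2.toNat (some "S"))
    else if row_type == "B" then st.1.set st.2.toNat (some "B")
    else if row_type == "S" then st.1.set st.2.toNat (some "S")
    else st.1
  (lst, st.2 + 1)

def get_well_types (grid : Int × Int) (row_types : List String) : List (Option String) :=
  let amount_of_wells := grid.1 * grid.2
  let list_of_well_types : List (Option String) :=
    (PySem.List.pyRange 0 amount_of_wells 1).map (fun _ => none)
  let final :=
    (PySem.List.pyRange 0 grid.1 1).foldl
      (fun st row =>
        let row_type := (PySem.List.pyGet? row_types row).getD ""   -- raises outside Pre_
        (PySem.List.pyRange 0 grid.2 1).foldl (pvStepA row_type) st)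
      (list_of_well_types, 0)
  final.1

-- ===== PORT B =====
-- the template dict of Source B, built once per call
def pvTemplates (cols : Int) : PySem.Dict String (List (Option String)) :=
  PySem.Dict.ofList
    [("BS", (PySem.List.pyRange 0 cols 1).map
        (fun c => if PySem.Int.mod c 2 == 0 then some "B" else some "S")),
     ("B", List.replicate cols.toNat (some "B")),
     ("S", List.replicate cols.toNat (some "S"))]

def get_well_types_alt (grid : Int × Int) (row_types : List String) : List (Option String) :=
  let templates := pvTemplates grid.2
  let blank := List.replicate grid.2.toNat (none : Option String)
  (PySem.List.pyRange 0 grid.1 1).flatMap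
    (fun row => templates.getD ((PySem.List.pyGet? row_types row).getD "") blank)
      -- pyGet? raises outside Pre_

-- ===== PRECONDITION & SPEC =====
-- Pre_ excludes exactly the inputs where A raises IndexError: row_types shorter than the
-- number of rows iterated (B raises there too).
def Pre_get_well_types (grid : Int × Int) (row_types : List String) : Prop :=
  grid.1 ≤ (row_types.length : Int)
instance (grid : Int × Int) (row_types : List String) : Decidable (Pre_get_well_types grid row_types) := by unfold Pre_get_well_types; infer_instance
def pvWitness_get_well_types : (Int × Int) × List String := ((2, 3), ["BS", "B"])

-- On grids with both dimensions negative A returns a list of grid[0]*grid[1] leftover None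
-- entries from its preallocation while B returns the empty list, the intended result for a
-- grid with no rows.
def D_get_well_types (grid : Int × Int) (row_types : List String) : Prop :=
  grid.1 < 0 ∧ grid.2 < 0
instance (grid : Int × Int) (row_types : List String) : Decidable (D_get_well_types grid row_types) := by unfold D_get_well_types; infer_instance

def Spec_get_well_types (grid : Int × Int) (row_types : List String) (out : List (Option String)) : Prop := ¬ D_get_well_types grid row_types → out = get_well_types_alt grid row_types
instance (grid : Int × Int) (row_types : List String) (out : List (Option String)) : Decidable (Spec_get_well_types grid row_types out) := by unfold Spec_get_well_types; infer_instance

def pvDiffWitness_get_well_types : (Int × Int) × List String := ((-1, -2), ["B"])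
def pvDiffWitnessOut_get_well_types : (List (Option String)) × (List (Option String)) :=
  ([none, none], [])

-- ===== CLAIM (what is proved, stated in full; the proofs are below) =====
def Claim_unchanged_get_well_types : Prop := ∀ (grid : Int × Int) (row_types : List String), Dom_get_well_types grid row_types → Pre_get_well_types grid row_types → Spec_get_well_types grid row_types (get_well_types grid row_types)
def Claim_changed_get_well_types : Prop := Dom_get_well_types (pvDiffWitness_get_well_types.1) (pvDiffWitness_get_well_types.2) ∧ Pre_get_well_types (pvDiffWitness_get_well_types.1) (pvDiffWitness_get_well_types.2) ∧ D_get_well_types (pvDiffWitness_get_well_types.1) (pvDiffWitness_get_well_types.2) ∧ get_well_types (pvDiffWitness_get_well_types.1) (pvDiffWitness_get_well_types.2) = pvDiffWitnessOut_get_well_types.1 ∧ get_well_types_alt (pvDiffWitness_get_well_types.1) (pvDiffWitness_get_well_types.2) = pvDiffWitnessOut_get_well_types.2 ∧ pvDiffWitnessOut_get_well_types.1 ≠ pvDiffWitnessOut_get_well_types.2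
def Claim_exact_get_well_types : Prop := ∀ (grid : Int × Int) (row_types : List String), Dom_get_well_types grid row_types → Pre_get_well_types grid row_types → D_get_well_types grid row_types → get_well_types grid row_types ≠ get_well_types_alt grid row_types

-- ===== LEMMAS AND PROOFS =====

-- the value written by A into cell (·, c) of a row of type t (canonical cell value)
def pvCell (t : String) (c : Int) : Option String :=
  if t == "BS" then (if PySem.Int.mod c 2 == 0 then some "B" else some "S")
  else if t == "B" then some "B"
  else if t == "S" then some "S"
  else none

theorem pvTemplates_getD (cols : Int) (t : String) :
    (pvTemplates cols).getD t (List.replicate cols.toNat (none : Option String))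
    = (PySem.List.pyRange 0 cols 1).map (pvCell t) := by
  unfold pvTemplates pvCell
  simp only [PySem.Dict.ofList, PySem.Dict.update, List.foldl_cons, List.foldl_nil,
    PySem.Dict.getD_insert]
  split_ifs with h1 h2 h3 <;>
    simp_all [List.map_const', PySem.List.length_pyRange_one]

theorem pvStepA_at (t : String) (c : Int) (L R : List (Option String)) :
    pvStepA t (L ++ (none : Option String) :: R, (L.length : Int)) c
    = (L ++ pvCell t c :: R, (L.length : Int) + 1) := by
  have hidx : ((L.length : Int)).toNat = L.length := by omega
  have hset : ∀ v : Option String, (L ++ (none : Option String) :: R).set L.length v = L ++ v :: R := by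
    intro v
    rw [List.set_append_right _ _ (Nat.le_refl _), Nat.sub_self]
    rfl
  unfold pvStepA pvCell
  split_ifs <;> simp [hidx, hset]

theorem pvInner (t : String) : ∀ (j : Nat) (pre : List (Option String)) (k : Nat), j ≤ k →
    (PySem.List.pyRange 0 (j : Int) 1).foldl (pvStepA t)
      (pre ++ List.replicate k (none : Option String), (pre.length : Int))
    = (pre ++ (PySem.List.pyRange 0 (j : Int) 1).map (pvCell t)
          ++ List.replicate (k - j) (none : Option String),
       (pre.length : Int) + j) := by
  intro j
  induction j with
  | zero => intro pre k _; simp [PySem.List.pyRange_one_eq_nil]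
  | succ j ih =>
    intro pre k hk
    have hcast : ((j + 1 : Nat) : Int) = (j : Int) + 1 := by push_cast; ring
    rw [hcast, PySem.List.pyRange_one_succ_right (by positivity), List.foldl_append,
        ih pre k (Nat.le_of_succ_le hk), List.map_append]
    have hrep : List.replicate (k - j) (none : Option String)
        = (none : Option String) :: List.replicate (k - (j + 1)) none := by
      have h : k - j = (k - (j + 1)) + 1 := by omega
      rw [h, List.replicate_succ]
    have hlen : ((pre ++ (PySem.List.pyRange 0 (j : Int) 1).map (pvCell t)).length : Int)
        = (pre.length : Int) + (j : Int) := by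
      simp [PySem.List.length_pyRange_one]
    simp only [List.foldl_cons, List.foldl_nil]
    rw [← List.append_assoc, hrep, ← hlen, pvStepA_at]
    simp [PySem.List.length_pyRange_one]
    ring

theorem pvInner' (t : String) (cols : Int) (pre : List (Option String)) (k : Nat)
    (hk : cols.toNat ≤ k) :
    (PySem.List.pyRange 0 cols 1).foldl (pvStepA t)
      (pre ++ List.replicate k (none : Option String), (pre.length : Int))
    = (pre ++ (PySem.List.pyRange 0 cols 1).map (pvCell t)
          ++ List.replicate (k - cols.toNat) (none : Option String),
       (pre.length : Int) + (cols.toNat : Int)) := by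
  by_cases h : cols ≤ 0
  · rw [PySem.List.pyRange_one_eq_nil h]
    have : cols.toNat = 0 := by omega
    simp [this]
  · have h' : cols = ((cols.toNat : Nat) : Int) := by omega
    rw [h']
    exact pvInner t cols.toNat pre k hk

theorem pvFlatLen (g : Int → String) (cols : Int) (n : Nat) :
    ((PySem.List.pyRange 0 (n : Int) 1).flatMap
      (fun row => (PySem.List.pyRange 0 cols 1).map (pvCell (g row)))).length
    = n * cols.toNat := by
  simp [List.length_flatMap, PySem.List.length_pyRange_one,
    List.map_const', List.sum_replicate, smul_eq_mul]

theorem pvOuter (rts : List String) (cols : Int) : ∀ (n : Nat) (k : Nat),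
    n * cols.toNat ≤ k →
    (PySem.List.pyRange 0 (n : Int) 1).foldl
      (fun st row =>
        (PySem.List.pyRange 0 cols 1).foldl
          (pvStepA ((PySem.List.pyGet? rts row).getD "")) st)
      (List.replicate k (none : Option String), 0)
    = ((PySem.List.pyRange 0 (n : Int) 1).flatMap
          (fun row => (PySem.List.pyRange 0 cols 1).map
            (pvCell ((PySem.List.pyGet? rts row).getD "")))
        ++ List.replicate (k - n * cols.toNat) (none : Option String),
       ((n * cols.toNat : Nat) : Int)) := by
  intro n
  induction n with
  | zero =>
    intro k _
    simp [PySem.List.pyRange_one_eq_nil]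
  | succ n ih =>
    intro k hk
    have hmul : (n + 1) * cols.toNat = n * cols.toNat + cols.toNat := by ring
    rw [hmul] at hk ⊢
    have hcast : ((n + 1 : Nat) : Int) = (n : Int) + 1 := by push_cast; ring
    rw [hcast, PySem.List.pyRange_one_succ_right (by positivity), List.foldl_append,
        ih k (by omega), List.flatMap_append]
    have hlen : ((n * cols.toNat : Nat) : Int)
        = (((PySem.List.pyRange 0 (n : Int) 1).flatMap
            (fun row => (PySem.List.pyRange 0 cols 1).map
              (pvCell ((PySem.List.pyGet? rts row).getD "")))).length : Int) := by
      rw [pvFlatLen (fun row => (PySem.List.pyGet? rts row).getD "") cols n]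
    simp only [List.foldl_cons, List.foldl_nil]
    rw [hlen, pvInner' _ cols _ _ (by omega)]
    rw [← hlen]
    have h1 : k - n * cols.toNat - cols.toNat = k - (n * cols.toNat + cols.toNat) := by omega
    have h2 : ((n * cols.toNat : Nat) : Int) + (cols.toNat : Int)
        = ((n * cols.toNat + cols.toNat : Nat) : Int) := by push_cast; ring
    simp [h1, List.append_assoc]

theorem pvAlt_eq_flatMap (grid : Int × Int) (rts : List String) :
    get_well_types_alt grid rts
    = (PySem.List.pyRange 0 grid.1 1).flatMap
        (fun row => (PySem.List.pyRange 0 grid.2 1).map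
          (pvCell ((PySem.List.pyGet? rts row).getD ""))) := by
  unfold get_well_types_alt
  simp only [pvTemplates_getD]

theorem get_well_types_spec : Claim_unchanged_get_well_types := by
  intro grid rts _dom _hpre hnd
  obtain ⟨rows, cols⟩ := grid
  have hnd' : ¬ (rows < 0 ∧ cols < 0) := hnd
  show get_well_types (rows, cols) rts = get_well_types_alt (rows, cols) rts
  rw [pvAlt_eq_flatMap]
  simp only [get_well_types]
  have hinit : (PySem.List.pyRange 0 (rows * cols) 1).map (fun _ => (none : Option String))
      = List.replicate ((rows * cols).toNat) none := by
    rw [List.map_const', PySem.List.length_pyRange_one]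
    norm_num
  rw [hinit]
  by_cases h : rows ≤ 0
  · rw [PySem.List.pyRange_one_eq_nil h]
    have hz : (rows * cols).toNat = 0 := by
      rcases lt_or_eq_of_le h with h0 | h0
      · have hc : 0 ≤ cols := by
          by_contra hc
          exact hnd' ⟨h0, by omega⟩
        have : rows * cols ≤ 0 := mul_nonpos_iff.mpr (Or.inr ⟨le_of_lt h0, hc⟩)
        omega
      · simp [h0]
    simp [hz]
  · have hn : rows = ((rows.toNat : Nat) : Int) := by omega
    have hkeq : (rows * cols).toNat = rows.toNat * cols.toNat := by
      by_cases hc : 0 ≤ cols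
      · have : rows * cols = ((rows.toNat * cols.toNat : Nat) : Int) := by
          push_cast
          rw [← hn, Int.toNat_of_nonneg hc]
        rw [this, Int.toNat_natCast]
      · have h1 : rows * cols ≤ 0 := by nlinarith [lt_of_not_ge hc, lt_of_not_ge h]
        have h2 : cols.toNat = 0 := by omega
        rw [h2, Nat.mul_zero]
        omega
    rw [hkeq]
    rw [show PySem.List.pyRange 0 rows 1 = PySem.List.pyRange 0 ((rows.toNat : Nat) : Int) 1 from by rw [← hn]]
    rw [pvOuter rts cols rows.toNat (rows.toNat * cols.toNat) (Nat.le_refl _)]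
    simp

theorem get_well_types_changed : Claim_changed_get_well_types := by
  unfold Claim_changed_get_well_types; decide

theorem get_well_types_tight : Claim_exact_get_well_types := by
  intro grid rts _dom _hpre hd
  obtain ⟨rows, cols⟩ := grid
  obtain ⟨hr, hc⟩ := hd
  simp only at hr hc
  have hpos : 0 < rows * cols := mul_pos_of_neg_of_neg hr hc
  rw [pvAlt_eq_flatMap]
  simp only [get_well_types]
  rw [PySem.List.pyRange_one_eq_nil (le_of_lt hr)]
  simp only [List.foldl_nil, List.flatMap_nil]
  intro heq
  apply_fun List.length at heq
  simp [PySem.List.length_pyRange_one] at heq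
  omega
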